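-- pv_equiv track=rewrite | github.com/sa1dasari/Study-of-Drift-Triggered-Retraining-Policies-Under-Budget-and-Latency-Constraints | luflow_fitness_check.py | _pick_drift_periods
-- ===== SOURCE A (Python) =====
-- def _pick_drift_periods(per_day):
--     """
--     Group days into three periods by month/year:
--       Period A = Jan 2021   (8 days, mix of 0% and ~50% malicious)
--       Period B = Feb 2021   (10 days, consistently 22-44% malicious)
--       Period C = Jun 2022   (3 days, 0-58% malicious)
--     """
--     buckets = {"jan21": [], "feb21": [], "jun22": []}
--     for stem, _, _, _, _ in per_day:
--         if stem.startswith("2021.01"):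
--             buckets["jan21"].append(stem)
--         elif stem.startswith("2021.02"):
--             buckets["feb21"].append(stem)
--         elif stem.startswith("2022.06"):
--             buckets["jun22"].append(stem)
--     result = []
--     for key in ["jan21", "feb21", "jun22"]:
--         if buckets[key]:
--             result.append(buckets[key])
--     return result
-- ===== SOURCE B (Python) =====
-- def _pick_drift_periods(per_day):
--     jan = [stem for stem, *_ in per_day if stem.startswith("2021.01")]
--     feb = [stem for stem, *_ in per_day if stem.startswith("2021.02")]
--     jun = [stem for stem, *_ in per_day if stem.startswith("2022.06")]
--     return [b for b in (jan, feb, jun) if b]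
-- ===== Notes on version B (the rewrite author's own statement) =====
-- stated objective: simpler
-- what changed: Replaces the single classifying pass that maintains a dict of three mutable buckets (plus a second key loop) with three independent filtering comprehensions, one per fixed period, followed by dropping the empty ones.
import Mathlib
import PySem

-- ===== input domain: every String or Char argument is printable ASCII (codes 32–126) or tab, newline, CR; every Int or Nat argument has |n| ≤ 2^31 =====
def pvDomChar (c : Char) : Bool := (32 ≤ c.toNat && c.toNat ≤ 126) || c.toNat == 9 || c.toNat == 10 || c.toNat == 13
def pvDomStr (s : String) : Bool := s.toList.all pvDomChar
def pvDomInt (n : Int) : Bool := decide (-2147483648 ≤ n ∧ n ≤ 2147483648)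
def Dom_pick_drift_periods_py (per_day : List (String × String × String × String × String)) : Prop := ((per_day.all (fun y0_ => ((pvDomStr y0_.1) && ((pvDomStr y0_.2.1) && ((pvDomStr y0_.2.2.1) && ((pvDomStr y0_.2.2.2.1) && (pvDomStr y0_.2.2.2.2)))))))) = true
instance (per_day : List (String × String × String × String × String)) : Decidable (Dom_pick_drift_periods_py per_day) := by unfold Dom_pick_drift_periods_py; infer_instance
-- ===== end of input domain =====

-- B replaces A's single classifying pass over a dict of three buckets with three
-- independent filtering passes, one per fixed period (objective: simpler; not faster).

-- ===== PORT A =====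
-- loop body of A's bucket-filling pass (branches in A's order)
def pvStepA (b : PySem.Dict String (List String)) (t : String × String × String × String × String) :
    PySem.Dict String (List String) :=
  let stem := t.1
  if PySem.Str.startswith stem "2021.01" then b.modify "jan21" [] (· ++ [stem])
  else if PySem.Str.startswith stem "2021.02" then b.modify "feb21" [] (· ++ [stem])
  else if PySem.Str.startswith stem "2022.06" then b.modify "jun22" [] (· ++ [stem])
  else b

def pick_drift_periods_py (per_day : List (String × String × String × String × String)) : List (List String) :=
  let buckets : PySem.Dict String (List String) :=
    PySem.Dict.ofList [("jan21", []), ("feb21", []), ("jun22", [])]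
  let buckets := per_day.foldl pvStepA buckets
  ["jan21", "feb21", "jun22"].foldl (fun result key =>
    if !(buckets.getD key []).isEmpty then result ++ [buckets.getD key []] else result) []

-- ===== PORT B =====
def pick_drift_periods_py_alt (per_day : List (String × String × String × String × String)) : List (List String) :=
  let jan := (per_day.map (·.1)).filter (fun stem => PySem.Str.startswith stem "2021.01")
  let feb := (per_day.map (·.1)).filter (fun stem => PySem.Str.startswith stem "2021.02")
  let jun := (per_day.map (·.1)).filter (fun stem => PySem.Str.startswith stem "2022.06")
  [jan, feb, jun].filter (fun b => !b.isEmpty)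

-- ===== PRECONDITION & SPEC =====
def Spec_pick_drift_periods_py (per_day : List (String × String × String × String × String)) (out : List (List String)) : Prop := out = pick_drift_periods_py_alt per_day
instance (per_day : List (String × String × String × String × String)) (out : List (List String)) : Decidable (Spec_pick_drift_periods_py per_day out) := by unfold Spec_pick_drift_periods_py; infer_instance

-- ===== CLAIM (what is proved, stated in full; the proofs are below) =====
def Claim_equal_pick_drift_periods_py : Prop := ∀ (per_day : List (String × String × String × String × String)), Dom_pick_drift_periods_py per_day → Spec_pick_drift_periods_py per_day (pick_drift_periods_py per_day)

-- ===== LEMMAS AND PROOFS =====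

-- two distinct equal-length prefixes cannot both be prefixes of the same string
lemma startswith_excl (s p q : List Char) (hlen : p.length = q.length)
    (hne : p ≠ q) (h : PySem.Chars.startswith s p = true) :
    PySem.Chars.startswith s q = false := by
  by_contra hq
  rw [Bool.not_eq_false] at hq
  rw [PySem.Chars.startswith_iff] at h hq
  exact hne ((List.prefix_of_prefix_length_le h hq (le_of_eq hlen)).eq_of_length hlen)

-- the bucket-filling fold, characterised by three independent filters
lemma fold_buckets (l : List (String × String × String × String × String))
    (j f u : List String) :
    l.foldl pvStepA (PySem.Dict.mk [("jan21", j), ("feb21", f), ("jun22", u)]) =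
    PySem.Dict.mk
      [("jan21", j ++ (l.map (·.1)).filter (fun s => PySem.Str.startswith s "2021.01")),
       ("feb21", f ++ (l.map (·.1)).filter (fun s => PySem.Str.startswith s "2021.02")),
       ("jun22", u ++ (l.map (·.1)).filter (fun s => PySem.Str.startswith s "2022.06"))] := by
  induction l generalizing j f u with
  | nil => simp
  | cons t rest ih =>
    rw [List.foldl_cons]
    by_cases h1 : PySem.Chars.startswith t.1.toList ['2','0','2','1','.','0','1'] = true
    · have h2 := startswith_excl t.1.toList ['2','0','2','1','.','0','1'] ['2','0','2','1','.','0','2'] (by decide) (by decide) h1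
      have h3 := startswith_excl t.1.toList ['2','0','2','1','.','0','1'] ['2','0','2','2','.','0','6'] (by decide) (by decide) h1
      rw [show pvStepA (PySem.Dict.mk [("jan21", j), ("feb21", f), ("jun22", u)]) t
            = PySem.Dict.mk [("jan21", j ++ [t.1]), ("feb21", f), ("jun22", u)] from by
        simp [pvStepA, h1, PySem.Dict.modify, PySem.Dict.getD, PySem.Dict.get?_mk_cons,
          PySem.Dict.insert, PySem.Dict.contains], ih]
      simp [h1, h2, h3]
    · by_cases h2 : PySem.Chars.startswith t.1.toList ['2','0','2','1','.','0','2'] = true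
      · have h3 := startswith_excl t.1.toList ['2','0','2','1','.','0','2'] ['2','0','2','2','.','0','6'] (by decide) (by decide) h2
        rw [show pvStepA (PySem.Dict.mk [("jan21", j), ("feb21", f), ("jun22", u)]) t
              = PySem.Dict.mk [("jan21", j), ("feb21", f ++ [t.1]), ("jun22", u)] from by
          simp [pvStepA, h1, h2, PySem.Dict.modify, PySem.Dict.getD, PySem.Dict.get?_mk_cons,
            PySem.Dict.insert, PySem.Dict.contains], ih]
        simp [h1, h2, h3]
      · by_cases h3 : PySem.Chars.startswith t.1.toList ['2','0','2','2','.','0','6'] = true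
        · rw [show pvStepA (PySem.Dict.mk [("jan21", j), ("feb21", f), ("jun22", u)]) t
                = PySem.Dict.mk [("jan21", j), ("feb21", f), ("jun22", u ++ [t.1])] from by
            simp [pvStepA, h1, h2, h3, PySem.Dict.modify, PySem.Dict.getD, PySem.Dict.get?_mk_cons,
              PySem.Dict.insert, PySem.Dict.contains], ih]
          simp [h1, h2, h3]
        · rw [show pvStepA (PySem.Dict.mk [("jan21", j), ("feb21", f), ("jun22", u)]) t
                = PySem.Dict.mk [("jan21", j), ("feb21", f), ("jun22", u)] from by
            simp [pvStepA, h1, h2, h3], ih]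
          simp [h1, h2, h3]

-- the result-collection loop over the three fixed keys, as a filter of the three buckets
lemma result_loop (J F U : List String) :
    ["jan21", "feb21", "jun22"].foldl (fun result key =>
      if !((PySem.Dict.mk [("jan21", J), ("feb21", F), ("jun22", U)]).getD key []).isEmpty
      then result ++ [(PySem.Dict.mk [("jan21", J), ("feb21", F), ("jun22", U)]).getD key []]
      else result) [] = [J, F, U].filter (fun b => !b.isEmpty) := by
  cases J <;> cases F <;> cases U <;>
    simp [PySem.Dict.getD, PySem.Dict.get?_mk_cons, List.filter]

-- ===== VERDICT (by name: the statement is the Claim_ definition above) =====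
theorem pick_drift_periods_py_spec : Claim_equal_pick_drift_periods_py := by
  intro per_day _
  show pick_drift_periods_py per_day = pick_drift_periods_py_alt per_day
  simp only [pick_drift_periods_py, pick_drift_periods_py_alt]
  rw [show PySem.Dict.ofList [("jan21", ([] : List String)), ("feb21", []), ("jun22", [])]
        = PySem.Dict.mk [("jan21", []), ("feb21", []), ("jun22", [])] from by decide]
  rw [fold_buckets]
  simp only [List.nil_append]
  rw [result_loop]
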